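-- pv_equiv track=rewrite | github.com/mfarahani1998/coco-inference-pytorch | src/bench_ultralytics.py | extract_metric_key
-- ===== SOURCE A (Python) =====
-- from typing import Any, Dict, Iterable, List, Optional, Sequence, Set, Tuple, Union
--
-- METRIC_KEY = "metrics/mAP50-95(B)"
--
-- def extract_metric_key(results_dict: Dict[str, Any]) -> str:
--     for key in results_dict:
--         if key.startswith("metrics/") and "mAP50-95" in key:
--             return key
--     for key in results_dict:
--         if "mAP50-95" in key:
--             return key
--     return METRIC_KEY
-- ===== SOURCE B (Python) =====
-- METRIC_KEY = "metrics/mAP50-95(B)"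
--
-- def extract_metric_key(results_dict):
--     # Single pass: return first strong match immediately, remember first weak match as fallback.
--     fallback = None
--     for key in results_dict:
--         if key.startswith("metrics/") and "mAP50-95" in key:
--             return key
--         if fallback is None and "mAP50-95" in key:
--             fallback = key
--     return fallback if fallback is not None else METRIC_KEY
-- ===== Notes on version B (the rewrite author's own statement) =====
-- stated objective: alternative
-- what changed: Replaced A's two sequential scans over the dict keys with a single pass that returns on a strong match and records the first weak match in a fallback variable.
import Mathlib
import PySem

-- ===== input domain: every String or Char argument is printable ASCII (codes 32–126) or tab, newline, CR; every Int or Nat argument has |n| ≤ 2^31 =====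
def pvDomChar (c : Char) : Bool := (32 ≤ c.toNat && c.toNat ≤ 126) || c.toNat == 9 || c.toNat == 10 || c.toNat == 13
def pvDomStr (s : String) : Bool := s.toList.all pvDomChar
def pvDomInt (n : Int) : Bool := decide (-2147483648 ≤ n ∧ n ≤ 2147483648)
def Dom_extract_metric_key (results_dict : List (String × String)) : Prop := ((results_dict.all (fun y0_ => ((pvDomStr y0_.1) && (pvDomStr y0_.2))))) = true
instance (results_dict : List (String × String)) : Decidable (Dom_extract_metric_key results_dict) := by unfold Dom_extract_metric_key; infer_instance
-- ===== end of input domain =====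

-- ===== PORT A =====
-- One honest line: B fuses A's two scans into a single pass with a fallback variable (objective: alternative).
def pvStrong (k : String) : Bool := PySem.Str.startswith k "metrics/" && PySem.Str.isIn "mAP50-95" k

def pvWeak (k : String) : Bool := PySem.Str.isIn "mAP50-95" k

def pvMETRIC_KEY : String := "metrics/mAP50-95(B)"

-- first for-loop of A: first key with the strong condition
def pvALoop1 : List (String × String) → Option String
  | [] => none
  | (k, _) :: t => if pvStrong k then some k else pvALoop1 t

-- second for-loop of A: first key containing "mAP50-95"
def pvALoop2 : List (String × String) → Option String
  | [] => none
  | (k, _) :: t => if pvWeak k then some k else pvALoop2 t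

def extract_metric_key (results_dict : List (String × String)) : String :=
  match pvALoop1 results_dict with
  | some k => k
  | none =>
    match pvALoop2 results_dict with
    | some k => k
    | none => pvMETRIC_KEY

-- ===== PORT B =====
-- single pass over the keys, carrying the fallback variable
def pvBLoop (fb : Option String) : List (String × String) → String
  | [] => match fb with
          | some f => f
          | none => pvMETRIC_KEY
  | (k, _) :: t =>
    if pvStrong k then k
    else pvBLoop (if fb.isNone && pvWeak k then some k else fb) t

def extract_metric_key_alt (results_dict : List (String × String)) : String :=
  pvBLoop none results_dict

-- ===== PRECONDITION & SPEC =====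
def Spec_extract_metric_key (results_dict : List (String × String)) (out : String) : Prop := out = extract_metric_key_alt results_dict
instance (results_dict : List (String × String)) (out : String) : Decidable (Spec_extract_metric_key results_dict out) := by unfold Spec_extract_metric_key; infer_instance

-- ===== CLAIM (what is proved, stated in full; the proofs are below) =====
def Claim_equal_extract_metric_key : Prop := ∀ (results_dict : List (String × String)), Dom_extract_metric_key results_dict → Spec_extract_metric_key results_dict (extract_metric_key results_dict)

-- ===== LEMMAS AND PROOFS =====
theorem pvBLoop_eq (l : List (String × String)) : ∀ fb : Option String,
    pvBLoop fb l =
      match pvALoop1 l with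
      | some k => k
      | none =>
        match fb with
        | some f => f
        | none =>
          match pvALoop2 l with
          | some k => k
          | none => pvMETRIC_KEY := by
  induction l with
  | nil => intro fb; cases fb <;> rfl
  | cons p t ih =>
    intro fb
    obtain ⟨k, v⟩ := p
    simp only [pvBLoop, pvALoop1, pvALoop2]
    by_cases hs : pvStrong k
    · simp [hs]
    · cases fb with
      | some f => simp [hs, ih]
      | none =>
        by_cases hw : pvWeak k
        · simp [hs, hw, ih]
        · simp [hs, hw, ih]

-- ===== VERDICT (by name: the statement is the Claim_ definition above) =====
theorem extract_metric_key_spec : Claim_equal_extract_metric_key := by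
  intro rd _
  unfold Spec_extract_metric_key extract_metric_key extract_metric_key_alt
  rw [pvBLoop_eq]
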